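-- pv_equiv track=rewrite | github.com/Jaganpro/sf-knowledge-tools | knowledge/query/rag_engine.py | _group_by_structure
-- ===== SOURCE A (Python) =====
-- from typing import List, Optional, Dict, Any, Tuple
--
-- def _group_by_structure(results: List[Dict]) -> Dict[str, List[Dict]]:
--     """Group results by document structure."""
--     grouped = {}
--
--     for result in results:
--         chapter = result.get('chapter', 'Uncategorized')
--         section = result.get('section', '')
--
--         key = chapter
--         if section:
--             key = f"{chapter} > {section}"
--
--         if key not in grouped:
--             grouped[key] = []
--         grouped[key].append(result)
--
--     return grouped
-- ===== SOURCE B (Python) =====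
-- def _group_by_structure(results):
--     """Group results by document structure (keys-first decomposition)."""
--     def _key_of(r):
--         chapter = r.get('chapter', 'Uncategorized')
--         section = r.get('section', '')
--         return f"{chapter} > {section}" if section else chapter
--
--     keys = list(dict.fromkeys(_key_of(r) for r in results))
--     return {k: [r for r in results if _key_of(r) == k] for k in keys}
-- ===== Notes on version B (the rewrite author's own statement) =====
-- stated objective: alternative
-- what changed: Instead of one pass that grows a dict by conditional insert and append, B first collects the distinct grouping keys in order of first appearance (dict.fromkeys) and then builds each group by filtering the whole result list per key.
import Mathlib
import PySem

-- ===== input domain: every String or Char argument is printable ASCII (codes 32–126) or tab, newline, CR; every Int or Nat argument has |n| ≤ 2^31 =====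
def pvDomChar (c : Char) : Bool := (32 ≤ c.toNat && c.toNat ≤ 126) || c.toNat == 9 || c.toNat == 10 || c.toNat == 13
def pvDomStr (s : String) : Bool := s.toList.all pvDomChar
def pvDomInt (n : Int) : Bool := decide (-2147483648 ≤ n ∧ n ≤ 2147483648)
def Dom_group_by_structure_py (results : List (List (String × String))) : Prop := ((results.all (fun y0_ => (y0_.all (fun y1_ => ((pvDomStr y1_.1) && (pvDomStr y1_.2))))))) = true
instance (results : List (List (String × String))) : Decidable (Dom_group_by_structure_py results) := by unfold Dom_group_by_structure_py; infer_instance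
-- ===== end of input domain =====

-- B groups by first computing the distinct keys in first-appearance order, then filtering per key
-- (a different decomposition of the same grouping; same return value, no speed claim).

-- ===== PORT A =====
-- one pass: grow a dict, conditionally inserting an empty group, then appending
def pvStepA (grouped : PySem.Dict String (List (List (String × String)))) (result : List (String × String)) : PySem.Dict String (List (List (String × String))) :=
  let chapter := (PySem.Dict.mk result).getD "chapter" "Uncategorized"
  let sec := (PySem.Dict.mk result).getD "section" ""
  let key := if sec ≠ "" then chapter ++ " > " ++ sec else chapter
  let grouped := if grouped.contains key then grouped else grouped.insert key []
  grouped.modify key [] (fun g => g ++ [result])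

def group_by_structure_py (results : List (List (String × String))) : List (String × List (List (String × String))) :=
  (results.foldl pvStepA PySem.Dict.empty).items

-- ===== PORT B =====
-- the grouping key of one result (B's _key_of helper)
def pvKeyB (r : List (String × String)) : String :=
  let chapter := (PySem.Dict.mk r).getD "chapter" "Uncategorized"
  let sec := (PySem.Dict.mk r).getD "section" ""
  if sec ≠ "" then chapter ++ " > " ++ sec else chapter

def group_by_structure_py_alt (results : List (List (String × String))) : List (String × List (List (String × String))) :=
  let keys := PySem.List.dedup (results.map pvKeyB)
  keys.map (fun k => (k, results.filter (fun r => pvKeyB r == k)))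

-- ===== PRECONDITION & SPEC =====
def Spec_group_by_structure_py (results : List (List (String × String))) (out : List (String × List (List (String × String)))) : Prop := out = group_by_structure_py_alt results
instance (results : List (List (String × String))) (out : List (String × List (List (String × String)))) : Decidable (Spec_group_by_structure_py results out) := by unfold Spec_group_by_structure_py; infer_instance

-- ===== CLAIM (what is proved, stated in full; the proofs are below) =====
def Claim_equal_group_by_structure_py : Prop := ∀ (results : List (List (String × String))), Dom_group_by_structure_py results → Spec_group_by_structure_py results (group_by_structure_py results)

-- ===== LEMMAS AND PROOFS =====

-- A's step is: ensure the key is present, then append; its key is B's key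
theorem pvStepA_eq (d : PySem.Dict String (List (List (String × String)))) (r : List (String × String)) :
    pvStepA d r = (if d.contains (pvKeyB r) then d else d.insert (pvKeyB r) []).modify (pvKeyB r) [] (fun g => g ++ [r]) := rfl

theorem keys_stepA (d : PySem.Dict String (List (List (String × String)))) (r : List (String × String)) :
    (pvStepA d r).keys = PySem.Set.add d.keys (pvKeyB r) := by
  rw [pvStepA_eq, PySem.Set.add_eq_ite]
  by_cases h : d.contains (pvKeyB r)
  · rw [if_pos h, PySem.Dict.keys_modify,
        PySem.Dict.keys_insert_of_contains _ _ h,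
        if_pos ((PySem.Dict.contains_iff_mem_keys d (pvKeyB r)).mp h)]
  · have h' : pvKeyB r ∉ d.keys := fun hm => h ((PySem.Dict.contains_iff_mem_keys d (pvKeyB r)).mpr hm)
    rw [if_neg h, PySem.Dict.keys_modify, PySem.Dict.insert_insert_self,
        PySem.Dict.keys_insert_of_not_contains _ _ (by simpa using h), if_neg h']

theorem getD_stepA (d : PySem.Dict String (List (List (String × String)))) (r : List (String × String)) (k : String) :
    (pvStepA d r).getD k [] = if k = pvKeyB r then d.getD k [] ++ [r] else d.getD k [] := by
  rw [pvStepA_eq]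
  by_cases h : d.contains (pvKeyB r)
  · rw [if_pos h, PySem.Dict.getD_modify]
    split_ifs with hk
    · subst hk; rfl
    · rfl
  · rw [if_neg h, PySem.Dict.getD_modify]
    split_ifs with hk
    · subst hk
      rw [PySem.Dict.getD_insert, if_pos rfl,
          PySem.Dict.getD_of_not_contains d [] (by simpa using h)]
    · rw [PySem.Dict.getD_insert, if_neg hk]

theorem keys_foldl_stepA (rs : List (List (String × String))) (d : PySem.Dict String (List (List (String × String)))) :
    (rs.foldl pvStepA d).keys = PySem.Set.update d.keys (rs.map pvKeyB) := by
  induction rs generalizing d with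
  | nil => simp [PySem.Set.update_nil]
  | cons r rs ih => simp [List.foldl_cons, ih, keys_stepA, PySem.Set.update_cons]

theorem getD_foldl_stepA (rs : List (List (String × String))) (d : PySem.Dict String (List (List (String × String)))) (k : String) :
    (rs.foldl pvStepA d).getD k [] = d.getD k [] ++ rs.filter (fun r => pvKeyB r == k) := by
  induction rs generalizing d with
  | nil => simp
  | cons r rs ih =>
    rw [List.foldl_cons, ih, getD_stepA, List.filter_cons]
    by_cases hk : pvKeyB r = k
    · simp [hk]
    · simp [hk, Ne.symm hk]

theorem nodup_keys_foldl_stepA (rs : List (List (String × String))) :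
    (rs.foldl pvStepA PySem.Dict.empty).keys.Nodup := by
  rw [keys_foldl_stepA]
  exact PySem.Set.nodup_update _ _ (by simp [PySem.Dict.keys_empty])

-- ===== VERDICT (by name: the statement is the Claim_ definition above) =====
theorem group_by_structure_py_spec : Claim_equal_group_by_structure_py := by
  intro results _
  unfold Spec_group_by_structure_py group_by_structure_py group_by_structure_py_alt
  rw [PySem.Dict.items_eq_map_keys _ (nodup_keys_foldl_stepA results) [],
      keys_foldl_stepA]
  simp only [PySem.Dict.keys_empty, PySem.Set.update_nil_left, PySem.List.dedup_eq_ofList]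
  refine List.map_congr_left (fun k _ => ?_)
  rw [getD_foldl_stepA]
  simp
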